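-- pv_equiv track=rewrite | github.com/kodflow/terraform-provider-n8n | fix_func007.py | parse_returns
-- ===== SOURCE A (Python) =====
-- def parse_returns(returns_str):
--     """Parse return types."""
--     if not returns_str:
--         return []
--
--     returns_str = returns_str.strip()
--
--     # Handle (type1, type2) format
--     if returns_str.startswith('(') and returns_str.endswith(')'):
--         inner = returns_str[1:-1]
--         # Split by comma
--         types = []
--         level = 0
--         current = []
--         for char in inner + ',':
--             if char in '([{':
--                 level += 1
--                 current.append(char)
--             elif char in ')]}':
--                 level -= 1
--                 current.append(char)
--             elif char == ',' and level == 0: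
--                 types.append(''.join(current).strip())
--                 current = []
--             else:
--                 current.append(char)
--         return [t for t in types if t]
--     else:
--         return [returns_str] if returns_str else []
-- ===== SOURCE B (Python) =====
-- def parse_returns(returns_str):
--     """Parse return types: split inner on every comma, then merge pieces by bracket balance."""
--     if not returns_str:
--         return []
--     s = returns_str.strip()
--     if s.startswith('(') and s.endswith(')'):
--         inner = s[1:-1]
--         out, depth, buf = [], 0, []
--         for piece in inner.split(','):
--             buf.append(piece)
--             depth += piece.count('(') + piece.count('[') + piece.count('{')
--             depth -= piece.count(')') + piece.count(']') + piece.count('}')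
--             if depth == 0:
--                 t = ','.join(buf).strip()
--                 if t:
--                     out.append(t)
--                 buf = []
--         return out
--     return [s] if s else []
-- ===== Notes on version B (the rewrite author's own statement) =====
-- stated objective: alternative
-- what changed: Instead of A's single char-by-char scan that accumulates the current segment and flushes it at each depth-0 comma, B splits the inner string on every comma in one library call and then merges adjacent pieces back together by tracking the bracket balance per piece (counted with str.count), emitting a merged group whenever the balance returns to zero.
import Mathlib
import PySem

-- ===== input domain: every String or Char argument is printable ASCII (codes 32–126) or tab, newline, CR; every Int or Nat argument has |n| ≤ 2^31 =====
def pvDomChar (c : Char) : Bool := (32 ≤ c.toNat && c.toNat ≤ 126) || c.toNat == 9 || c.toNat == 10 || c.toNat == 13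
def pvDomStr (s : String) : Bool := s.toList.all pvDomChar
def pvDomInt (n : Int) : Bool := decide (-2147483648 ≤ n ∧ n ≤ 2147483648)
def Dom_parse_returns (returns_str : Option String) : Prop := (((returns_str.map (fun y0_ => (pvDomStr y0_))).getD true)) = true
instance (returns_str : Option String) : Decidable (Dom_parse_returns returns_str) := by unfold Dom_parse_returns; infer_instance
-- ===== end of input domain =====

-- B replaces A's char-by-char accumulator scan with split-on-every-comma then merge pieces by bracket balance (objective: alternative decomposition, same cost).

-- ===== PORT A =====
-- loop body of A's single char scan; state = (types, level, current)
def pvStepA (st : List String × Int × List Char) (c : Char) : List String × Int × List Char :=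
  if c = '(' ∨ c = '[' ∨ c = '{' then (st.1, st.2.1 + 1, st.2.2 ++ [c])
  else if c = ')' ∨ c = ']' ∨ c = '}' then (st.1, st.2.1 - 1, st.2.2 ++ [c])
  else if c = ',' ∧ st.2.1 = 0 then
    (st.1 ++ [PySem.Str.strip (String.ofList st.2.2)], st.2.1, [])
  else (st.1, st.2.1, st.2.2 ++ [c])

def parse_returns (returns_str : Option String) : List String :=
  match returns_str with
  | none => []
  | some rs =>
    if rs = "" then []  -- 'if not returns_str'
    else
      let s := PySem.Str.strip rs
      if PySem.Str.startswith s "(" && PySem.Str.endswith s ")" then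
        let inner := PySem.Str.slice s (some 1) (some (-1))
        -- for char in inner + ','   (''.join(current) over a list of chars = String.ofList, exact)
        let st := (inner.toList ++ [',']).foldl pvStepA ([], 0, [])
        st.1.filter (fun t => t ≠ "")
      else
        if s = "" then [] else [s]

-- ===== PORT B =====
-- loop body of B's per-piece merge; state = (out, depth, buf)
def pvStepB (st : List String × Int × List String) (p : String) : List String × Int × List String :=
  let buf := st.2.2 ++ [p]
  let depth := st.2.1
    + (PySem.Str.count p "(" : Int) + (PySem.Str.count p "[" : Int) + (PySem.Str.count p "{" : Int)
    - (PySem.Str.count p ")" : Int) - (PySem.Str.count p "]" : Int) - (PySem.Str.count p "}" : Int)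
  if depth = 0 then
    let t := PySem.Str.strip (PySem.Str.join "," buf)
    (if t ≠ "" then st.1 ++ [t] else st.1, depth, [])
  else (st.1, depth, buf)

def parse_returns_alt (returns_str : Option String) : List String :=
  match returns_str with
  | none => []
  | some rs =>
    if rs = "" then []
    else
      let s := PySem.Str.strip rs
      if PySem.Str.startswith s "(" && PySem.Str.endswith s ")" then
        let inner := PySem.Str.slice s (some 1) (some (-1))
        let pieces := (PySem.Str.split? inner ",").getD []  -- sep ≠ "", so split never raises
        let st := pieces.foldl pvStepB ([], 0, [])
        st.1
      else
        if s = "" then [] else [s]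

-- ===== PRECONDITION & SPEC =====
def Spec_parse_returns (returns_str : Option String) (out : List String) : Prop := out = parse_returns_alt returns_str
instance (returns_str : Option String) (out : List String) : Decidable (Spec_parse_returns returns_str out) := by unfold Spec_parse_returns; infer_instance

-- ===== CLAIM (what is proved, stated in full; the proofs are below) =====
def Claim_equal_parse_returns : Prop := ∀ (returns_str : Option String), Dom_parse_returns returns_str → Spec_parse_returns returns_str (parse_returns returns_str)

-- ===== LEMMAS AND PROOFS =====

-- pure split of a char list at every comma (accumulator = current partial piece)
def pvSplitP (cur : List Char) : List Char → List (List Char)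
  | [] => [cur]
  | c :: r => if c = ',' then cur :: pvSplitP [] r else pvSplitP (cur ++ [c]) r

-- common specification of the depth-0 comma split: (level, accumulated current, rest)
def pvSpecR (level : Int) (cur : List Char) : List Char → List String
  | [] =>
    if level = 0 then
      (if PySem.Str.strip (String.ofList cur) ≠ "" then [PySem.Str.strip (String.ofList cur)] else [])
    else []
  | c :: r =>
    if c = '(' ∨ c = '[' ∨ c = '{' then pvSpecR (level + 1) (cur ++ [c]) r
    else if c = ')' ∨ c = ']' ∨ c = '}' then pvSpecR (level - 1) (cur ++ [c]) r
    else if c = ',' ∧ level = 0 then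
      (if PySem.Str.strip (String.ofList cur) ≠ "" then [PySem.Str.strip (String.ofList cur)] else [])
        ++ pvSpecR 0 [] r
    else pvSpecR level (cur ++ [c]) r

-- bracket balance of a char list, as B counts it
def pvBalC (l : List Char) : Int :=
  (l.count '(' : Int) + (l.count '[' : Int) + (l.count '{' : Int)
    - (l.count ')' : Int) - (l.count ']' : Int) - (l.count '}' : Int)

-- chars of B's buffered pieces as A's `current` sees them: each piece followed by the comma that ended it
def pvFlat (buf : List String) : List Char := (buf.map (fun b => b.toList ++ [','])).flatten

-- A's scan computes pvSpecR
theorem pvLemA (l : List Char) : ∀ (types : List String) (level : Int) (cur : List Char),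
    ((l ++ [',']).foldl pvStepA (types, level, cur)).1.filter (fun t => t ≠ "")
      = types.filter (fun t => t ≠ "") ++ pvSpecR level cur l := by
  induction l with
  | nil =>
    intro types level cur
    by_cases h : level = 0
    · subst h
      simp [pvStepA, pvSpecR, List.filter_append, List.filter]
      split_ifs <;> simp_all
    · simp [pvStepA, pvSpecR, h]
  | cons c r ih =>
    intro types level cur
    simp only [List.cons_append, List.foldl_cons]
    by_cases h1 : c = '(' ∨ c = '[' ∨ c = '{'
    · simp only [pvStepA, if_pos h1, pvSpecR]
      rw [ih]
    · by_cases h2 : c = ')' ∨ c = ']' ∨ c = '}'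
      · simp only [pvStepA, if_neg h1, if_pos h2, pvSpecR]
        rw [ih]
      · by_cases h3 : c = ',' ∧ level = 0
        · simp only [pvStepA, if_neg h1, if_neg h2, if_pos h3, pvSpecR]
          rw [ih, h3.2, List.filter_append]
          simp [List.filter]
          split_ifs <;> simp_all
        · simp only [pvStepA, if_neg h1, if_neg h2, if_neg h3, pvSpecR]
          rw [ih]

-- str.count for a single-char needle is List.count
theorem pvCountGo (c : Char) : ∀ (fuel : Nat) (l : List Char) (acc : Nat), l.length ≤ fuel →
    PySem.Chars.count.go [c] fuel l acc = acc + l.count c := by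
  intro fuel
  induction fuel with
  | zero => intro l acc h
            have : l = [] := by cases l <;> simp_all
            subst this; simp [PySem.Chars.count.go]
  | succ n ih =>
    intro l acc h
    cases l with
    | nil => simp [PySem.Chars.count.go]
    | cons d t =>
      simp only [PySem.Chars.count.go]
      by_cases hd : d = c
      · subst hd
        rw [if_pos (by simp [List.isPrefixOf])]
        rw [ih _ _ (by simpa using Nat.le_of_succ_le_succ (by simpa using h))]
        simp
        omega
      · rw [if_neg (by simp [List.isPrefixOf]; exact fun h' => hd h'.symm)]
        rw [ih _ _ (by simpa using h)]
        simp [List.count_cons, hd]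

theorem pvCountOne (s : String) (c : Char) :
    PySem.Str.count s (String.ofList [c]) = s.toList.count c := by
  rw [PySem.Str.count_eq]
  simp only [String.toList_ofList]
  unfold PySem.Chars.count
  rw [if_neg (by simp)]
  rw [pvCountGo c _ _ _ (le_refl _)]
  simp

-- Python's split(',') is pvSplitP
theorem pvSplitGo : ∀ (fuel : Nat) (l cur : List Char) (acc : List (List Char)), l.length ≤ fuel →
    PySem.Chars.splitOn.go [','] fuel l cur acc = acc.reverse ++ pvSplitP cur.reverse l := by
  intro fuel
  induction fuel with
  | zero => intro l cur acc h
            have : l = [] := by cases l <;> simp_all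
            subst this; simp [PySem.Chars.splitOn.go, pvSplitP]
  | succ n ih =>
    intro l cur acc h
    cases l with
    | nil => simp [PySem.Chars.splitOn.go, pvSplitP]
    | cons d t =>
      simp only [PySem.Chars.splitOn.go]
      by_cases hd : d = ','
      · subst hd
        rw [if_pos (by simp [List.isPrefixOf])]
        rw [ih _ _ _ (by simpa using h)]
        simp [pvSplitP]
      · rw [if_neg (by simp [List.isPrefixOf]; exact fun h' => hd h'.symm)]
        rw [ih _ _ _ (by simpa using h)]
        simp [pvSplitP, hd]

theorem pvSplitOn (l : List Char) : PySem.Chars.splitOn l [','] = pvSplitP [] l := by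
  unfold PySem.Chars.splitOn
  rw [pvSplitGo _ _ _ _ (by omega)]
  simp

theorem pvStripCongr (X Y : String) (h : X.toList = Y.toList) :
    PySem.Str.strip X = PySem.Str.strip Y := by
  unfold PySem.Str.strip; rw [h]

theorem pvFlat_append (buf : List String) (p : String) :
    pvFlat (buf ++ [p]) = pvFlat buf ++ p.toList ++ [','] := by
  simp [pvFlat]

theorem pvJoinFlatC (buf : List String) (p : String) :
    PySem.Chars.join [','] ((buf ++ [p]).map String.toList) = pvFlat buf ++ p.toList := by
  induction buf with
  | nil => simp [pvFlat, PySem.Chars.join_singleton]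
  | cons b bs ih =>
    cases bs with
    | nil =>
      simp only [List.nil_append, List.cons_append, List.map_cons, List.map_nil]
      rw [PySem.Chars.join_cons_cons, PySem.Chars.join_singleton]
      simp [pvFlat]
    | cons b2 bs2 =>
      simp only [List.cons_append, List.map_cons] at ih ⊢
      rw [PySem.Chars.join_cons_cons, ih]
      simp [pvFlat]

theorem pvJoinFlat (buf : List String) (p : String) :
    (PySem.Str.join "," (buf ++ [p])).toList = pvFlat buf ++ p.toList := by
  unfold PySem.Str.join
  rw [String.toList_ofList]
  have : ("," : String).toList = [','] := rfl
  rw [this, pvJoinFlatC]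

theorem pvBalC_snoc (cur0 : List Char) (c : Char) :
    pvBalC (cur0 ++ [c]) =
      if c = '(' ∨ c = '[' ∨ c = '{' then pvBalC cur0 + 1
      else if c = ')' ∨ c = ']' ∨ c = '}' then pvBalC cur0 - 1
      else pvBalC cur0 := by
  simp only [pvBalC, List.count_append]
  split_ifs with h1 h2
  · rcases h1 with h | h | h <;> subst h <;> simp <;> push_cast <;> ring
  · rcases h2 with h | h | h <;> subst h <;> simp <;> push_cast <;> ring
  · have hz : ∀ a : Char, a ≠ c → List.count a [c] = 0 := by
      intro a ha; simp [List.count_cons, Ne.symm ha]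
    rw [hz '(' (by rintro rfl; exact h1 (Or.inl rfl)),
        hz '[' (by rintro rfl; exact h1 (Or.inr (Or.inl rfl))),
        hz '{' (by rintro rfl; exact h1 (Or.inr (Or.inr rfl))),
        hz ')' (by rintro rfl; exact h2 (Or.inl rfl)),
        hz ']' (by rintro rfl; exact h2 (Or.inr (Or.inl rfl))),
        hz '}' (by rintro rfl; exact h2 (Or.inr (Or.inr rfl)))]
    push_cast
    ring

-- B's step on the piece made of cur0's chars, in invariant form
theorem pvStepB_ofList (cur0 : List Char) (out : List String) (depth : Int) (buf : List String) :
    pvStepB (out, depth, buf) (String.ofList cur0) =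
      (if depth + pvBalC cur0 = 0 then
        ((if PySem.Str.strip (String.ofList (pvFlat buf ++ cur0)) ≠ "" then
            out ++ [PySem.Str.strip (String.ofList (pvFlat buf ++ cur0))] else out),
          depth + pvBalC cur0, [])
      else (out, depth + pvBalC cur0, buf ++ [String.ofList cur0])) := by
  unfold pvStepB
  have hc : ∀ c : Char, (PySem.Str.count (String.ofList cur0) (String.ofList [c]) : Int) = (cur0.count c : Int) := by
    intro c; rw [pvCountOne]; simp
  have h1 : ("(" : String) = String.ofList ['('] := rfl
  have h2 : ("[" : String) = String.ofList ['['] := rfl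
  have h3 : ("{" : String) = String.ofList ['{'] := rfl
  have h4 : (")" : String) = String.ofList [')'] := rfl
  have h5 : ("]" : String) = String.ofList [']'] := rfl
  have h6 : ("}" : String) = String.ofList ['}'] := rfl
  rw [h1, h2, h3, h4, h5, h6, hc, hc, hc, hc, hc, hc]
  have hdep : depth + (cur0.count '(' : Int) + (cur0.count '[' : Int) + (cur0.count '{' : Int)
      - (cur0.count ')' : Int) - (cur0.count ']' : Int) - (cur0.count '}' : Int) = depth + pvBalC cur0 := by
    simp [pvBalC]; ring
  rw [hdep]
  have hstrip : PySem.Str.strip (PySem.Str.join "," (buf ++ [String.ofList cur0]))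
      = PySem.Str.strip (String.ofList (pvFlat buf ++ cur0)) := by
    apply pvStripCongr
    rw [pvJoinFlat]
    simp
  simp only [hstrip]

-- B's piece merge computes pvSpecR as well
theorem pvLemB (l : List Char) : ∀ (cur0 : List Char) (out : List String) (depth : Int) (buf : List String),
    (((pvSplitP cur0 l).map String.ofList).foldl pvStepB (out, depth, buf)).1
      = out ++ pvSpecR (depth + pvBalC cur0) (pvFlat buf ++ cur0) l := by
  induction l with
  | nil =>
    intro cur0 out depth buf
    simp only [pvSplitP, List.map_cons, List.map_nil, List.foldl_cons, List.foldl_nil]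
    rw [pvStepB_ofList]
    by_cases h : depth + pvBalC cur0 = 0
    · rw [if_pos h]
      simp only [pvSpecR, if_pos h]
      split_ifs <;> simp
    · rw [if_neg h]
      simp [pvSpecR, h]
  | cons c r ih =>
    intro cur0 out depth buf
    by_cases hc : c = ','
    · subst hc
      simp only [pvSplitP, reduceIte, List.map_cons, List.foldl_cons]
      rw [pvStepB_ofList]
      have hno : ¬(',' = '(' ∨ ',' = '[' ∨ ',' = '{') := by decide
      have hnc : ¬(',' = ')' ∨ ',' = ']' ∨ ',' = '}') := by decide
      by_cases h : depth + pvBalC cur0 = 0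
      · rw [if_pos h]
        rw [ih]
        simp only [pvSpecR, if_neg hno, if_neg hnc]
        have : pvBalC ([] : List Char) = 0 := by decide
        simp [pvFlat, this]
        split_ifs <;> simp [h]
      · rw [if_neg h]
        rw [ih]
        simp only [pvSpecR, if_neg hno, if_neg hnc]
        have hb : pvBalC ([] : List Char) = 0 := by decide
        rw [pvFlat_append]
        simp [hb]
        exact fun h0 => absurd h0 h
    · simp only [pvSplitP, if_neg hc]
      rw [ih]
      rw [pvBalC_snoc]
      by_cases h1 : c = '(' ∨ c = '[' ∨ c = '{'
      · simp only [pvSpecR, if_pos h1]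
        simp [add_assoc]
      · by_cases h2 : c = ')' ∨ c = ']' ∨ c = '}'
        · simp only [pvSpecR, if_neg h1, if_pos h2]
          have : depth + (pvBalC cur0 - 1) = depth + pvBalC cur0 - 1 := by ring
          simp [this]
        · simp only [pvSpecR, if_neg h1, if_neg h2,
            if_neg (fun hh : c = ',' ∧ depth + pvBalC cur0 = 0 => hc hh.1)]
          simp

theorem pvPieces (inner : String) :
    (PySem.Str.split? inner ",").getD [] = (pvSplitP [] inner.toList).map String.ofList := by
  unfold PySem.Str.split? PySem.Chars.split?
  have : ("," : String).toList = [','] := rfl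
  rw [this, if_neg (by simp)]
  simp [pvSplitOn]

-- ===== VERDICT (by name: the statement is the Claim_ definition above) =====
theorem parse_returns_spec : Claim_equal_parse_returns := by
  intro x _
  unfold Spec_parse_returns
  cases x with
  | none => rfl
  | some rs =>
    by_cases h0 : rs = ""
    · simp [parse_returns, parse_returns_alt, h0]
    · by_cases h1 : (PySem.Str.startswith (PySem.Str.strip rs) "(" &&
          PySem.Str.endswith (PySem.Str.strip rs) ")") = true
      · simp only [parse_returns, parse_returns_alt, if_neg h0, if_pos h1]
        rw [pvLemA, pvPieces, pvLemB]
        have hb : pvBalC ([] : List Char) = 0 := by decide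
        simp [pvFlat, hb]
      · simp only [parse_returns, parse_returns_alt, if_neg h0, if_neg h1]
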